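-- pv_equiv track=rewrite | github.com/mahmoudben32/N-Reines | Projet-N-REINES/n-reines.py | calc_clauses
-- ===== SOURCE A (Python) =====
-- def calc_clauses_diag(n):
--     diag_cote = n-2
--     nb_clauses = 0
--
--     # calcul du nombre de clauses dans les diagonales en dessous de la diagonale principale
--     for i in range(1, diag_cote+1):
--         el_diag = n - i
--         for el in range(1, el_diag):
--             nb_clauses += el
--
--     # nombre de clauses avec les diagonales au dessus de la diag principale
--     nb_clauses = nb_clauses*2
--
--     # nombre de clauses dans la diagonale principale
--     for i in range(1, n):
--         nb_clauses += i
--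
--     # x2 pour les diagonales ascendantes et descendantes
--     nb_clauses = nb_clauses*2
--
--     return nb_clauses
--
-- def calc_clauses(n):
--     nb_clauses = 0
--
--     # maximum 1 reine par ligne
--     for i in range(1, n):
--         nb_clauses += i
--     nb_clauses = nb_clauses*n
--
--     # maximum 1 reine par colonne
--     nb_clauses = nb_clauses*2
--
--     # minimum 1 reine par ligne et par colonne
--     nb_clauses += 2*n
--
--     nb_clauses += calc_clauses_diag(n)
--
--     return nb_clauses
-- ===== SOURCE B (Python) =====
-- def calc_clauses(n):
--     # Closed-form count: the triangular and tetrahedral sums of A collapse to a polynomial.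
--     if n < 2:
--         return 2 * n
--     return n * n * (n - 1) + n * (n - 1) + 2 * n * (n - 1) * (n - 2) // 3 + 2 * n
-- ===== Notes on version B (the rewrite author's own statement) =====
-- stated objective: faster
-- what changed: Replaced the nested summation loops (per-row/column pair counts and per-diagonal triangular sums) by a closed-form cubic polynomial derived from triangular/tetrahedral number identities.
import Mathlib
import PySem

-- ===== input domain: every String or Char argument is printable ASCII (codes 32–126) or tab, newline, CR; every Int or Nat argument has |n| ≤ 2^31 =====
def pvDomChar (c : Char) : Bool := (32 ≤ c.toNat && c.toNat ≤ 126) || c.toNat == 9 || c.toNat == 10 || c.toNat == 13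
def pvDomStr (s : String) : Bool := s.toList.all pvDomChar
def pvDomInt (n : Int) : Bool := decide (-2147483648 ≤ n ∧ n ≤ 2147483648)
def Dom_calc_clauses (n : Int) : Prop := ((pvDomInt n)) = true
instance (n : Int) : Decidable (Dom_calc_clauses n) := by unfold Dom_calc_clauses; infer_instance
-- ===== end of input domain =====

-- B replaces A's nested summation loops by a closed-form cubic polynomial (faster: O(1) vs O(n^2)).


-- ===== PORT A =====
def calc_clauses_diag (n : Int) : Int :=
  let diag_cote := n - 2
  let nb0 : Int := (PySem.List.pyRange 1 (diag_cote + 1) 1).foldl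
    (fun acc i => (PySem.List.pyRange 1 (n - i) 1).foldl (fun a el => a + el) acc) 0
  let nb1 := nb0 * 2
  let nb2 := (PySem.List.pyRange 1 n 1).foldl (fun a i => a + i) nb1
  nb2 * 2

def calc_clauses (n : Int) : Int :=
  let nb0 : Int := (PySem.List.pyRange 1 n 1).foldl (fun a i => a + i) 0
  let nb1 := nb0 * n
  let nb2 := nb1 * 2
  let nb3 := nb2 + 2 * n
  nb3 + calc_clauses_diag n

-- ===== PORT B =====
def calc_clauses_alt (n : Int) : Int :=
  if n < 2 then 2 * n
  else n * n * (n - 1) + n * (n - 1) + PySem.Int.floordiv (2 * n * (n - 1) * (n - 2)) 3 + 2 * n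

-- ===== PRECONDITION & SPEC =====
def Spec_calc_clauses (n : Int) (out : Int) : Prop := out = calc_clauses_alt n
instance (n : Int) (out : Int) : Decidable (Spec_calc_clauses n out) := by unfold Spec_calc_clauses; infer_instance

-- ===== CLAIM (what is proved, stated in full; the proofs are below) =====
def Claim_equal_calc_clauses : Prop := ∀ (n : Int), Dom_calc_clauses n → Spec_calc_clauses n (calc_clauses n)

-- ===== LEMMAS AND PROOFS =====

/-- The sum A's simple loops compute: 1 + 2 + … + (n-1). -/
def pvS (n : Int) : Int := ((PySem.List.pyRange 1 n 1).map (fun i => i)).sum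

/-- The nested diagonal sum in `calc_clauses_diag`. -/
def pvW (n : Int) : Int := ((PySem.List.pyRange 1 (n - 1) 1).map (fun i => pvS (n - i))).sum

theorem pvS_nonpos (n : Int) (h : n ≤ 1) : pvS n = 0 := by
  simp [pvS, PySem.List.pyRange_one_eq_nil h]

theorem pvS_closed (n : Int) (h : 1 ≤ n) : 2 * pvS n = n * (n - 1) := by
  induction n, h using Int.le_induction with
  | base => simp [pvS, PySem.List.pyRange_one_eq_nil (le_refl 1)]
  | succ n hn ih =>
    have : pvS (n + 1) = pvS n + n := by
      simp [pvS, PySem.List.pyRange_one_succ_right hn]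
    rw [this]; ring_nf; linarith

theorem pvW_shift (n : Int) (h : 1 < n) :
    ((PySem.List.pyRange 1 n 1).map (fun i => pvS (n + 1 - i))).sum = pvS n + pvW n := by
  rw [PySem.List.pyRange_one_cons h]
  simp only [List.map_cons, List.sum_cons]
  have harg : n + 1 - 1 = n := by ring
  rw [harg]
  congr 1
  unfold pvW
  rw [show (1:Int) + 1 = 2 by norm_num]
  rw [PySem.List.pyRange_one 2 n, PySem.List.pyRange_one 1 (n - 1)]
  have hlen : (n - 2).toNat = (n - 1 - 1).toNat := by omega
  rw [List.map_map, List.map_map, hlen]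
  congr 1
  apply List.map_congr_left
  intro k _
  simp only [Function.comp]
  congr 1
  ring

theorem pvW_nonpos (n : Int) (h : n ≤ 2) : pvW n = 0 := by
  simp [pvW, PySem.List.pyRange_one_eq_nil (by omega : n - 1 ≤ 1)]

theorem pvW_closed (n : Int) (h : 2 ≤ n) : 6 * pvW n = n * (n - 1) * (n - 2) := by
  induction n, h using Int.le_induction with
  | base => rw [pvW_nonpos 2 (le_refl 2)]; ring
  | succ n hn ih =>
    have hstep : pvW (n + 1) = pvS n + pvW n := by
      have : pvW (n + 1) = ((PySem.List.pyRange 1 n 1).map (fun i => pvS (n + 1 - i))).sum := by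
        unfold pvW
        have : n + 1 - 1 = n := by ring
        rw [this]
      rw [this, pvW_shift n (by omega)]
    have hS := pvS_closed n (by omega)
    rw [hstep]
    linear_combination 3 * hS + ih

theorem calc_clauses_as_sums (n : Int) :
    calc_clauses n = 2 * n * pvS n + 2 * n + 4 * pvW n + 2 * pvS n := by
  have harg : n - 2 + 1 = n - 1 := by ring
  have h1 : ∀ (init : Int) (l : List Int),
      List.foldl (fun a i => a + i) init l = init + (l.map (fun i : Int => i)).sum :=
    fun init l => PySem.List.foldl_add l (fun i => i) init
  simp only [calc_clauses, calc_clauses_diag, harg, h1, PySem.List.foldl_add, pvS, pvW]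
  ring

theorem calc_clauses_spec_aux (n : Int) : calc_clauses n = calc_clauses_alt n := by
  rw [calc_clauses_as_sums]
  unfold calc_clauses_alt
  by_cases h : n < 2
  · rw [if_pos h, pvS_nonpos n (by omega), pvW_nonpos n (by omega)]; ring
  · rw [if_neg h]
    have hS := pvS_closed n (by omega)
    have hW := pvW_closed n (by omega)
    have hfd : PySem.Int.floordiv (2 * n * (n - 1) * (n - 2)) 3 = 4 * pvW n := by
      rw [show 2 * n * (n - 1) * (n - 2) = 3 * (4 * pvW n) by linarith,
        PySem.Int.floordiv_eq_ediv_of_pos (by norm_num),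
        Int.mul_ediv_cancel_left _ (by norm_num)]
    rw [hfd]
    linear_combination n * hS + hS

-- ===== VERDICT (by name: the statement is the Claim_ definition above) =====
theorem calc_clauses_spec : Claim_equal_calc_clauses := by
  intro n _
  exact calc_clauses_spec_aux n
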